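-- pv_equiv track=rewrite | github.com/WPorter94/Tokenization | tokenization.py | isShort
-- ===== SOURCE A (Python) =====
-- vowels =["a","e","i","o","u"]
--
-- def isShort(word):
--     combos = ["cvcv","cvc","vcv","vc"]
--     tracker = ''
--     for letter in word:
--         if letter not in vowels and not tracker:
--             tracker += 'c'
--         elif letter not in vowels and tracker[len(tracker) - 1] != 'c':
--             tracker += 'c'
--         if letter in vowels and not tracker:
--             tracker += 'v'
--         elif letter in vowels and tracker[len(tracker) - 1] != 'v':
--             tracker += 'v'
--     if tracker in combos:
--         return True
--     else:
--         return False
-- ===== SOURCE B (Python) =====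
-- vowels = ["a", "e", "i", "o", "u"]
--
-- def isShort(word):
--     # Count maximal runs of same vowel/consonant class in one pass; never build
--     # the pattern string. The collapsed pattern is alternating, so it is fully
--     # determined by the class of the first character and the number of runs:
--     # accepted patterns are exactly vc (2 runs, vowel first), cvc/vcv (3 runs),
--     # cvcv (4 runs, consonant first).
--     runs = 0
--     prev = None
--     first_is_vowel = False
--     for ch in word:
--         cls = ch in vowels
--         if prev is None:
--             first_is_vowel = cls
--             runs = 1
--         elif cls != prev:
--             runs += 1
--         prev = cls
--     return (runs == 2 and first_is_vowel) or runs == 3 or (runs == 4 and not first_is_vowel)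
-- ===== Notes on version B (the rewrite author's own statement) =====
-- stated objective: alternative
-- what changed: B never builds the collapsed pattern string or consults the template set: it counts class runs and records the first character's class in one pass, returning via the arithmetic characterisation (2 runs starting with a vowel, 3 runs, or 4 runs starting with a consonant), while A grows a tracker string and tests membership in the four templates.
import Mathlib
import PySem

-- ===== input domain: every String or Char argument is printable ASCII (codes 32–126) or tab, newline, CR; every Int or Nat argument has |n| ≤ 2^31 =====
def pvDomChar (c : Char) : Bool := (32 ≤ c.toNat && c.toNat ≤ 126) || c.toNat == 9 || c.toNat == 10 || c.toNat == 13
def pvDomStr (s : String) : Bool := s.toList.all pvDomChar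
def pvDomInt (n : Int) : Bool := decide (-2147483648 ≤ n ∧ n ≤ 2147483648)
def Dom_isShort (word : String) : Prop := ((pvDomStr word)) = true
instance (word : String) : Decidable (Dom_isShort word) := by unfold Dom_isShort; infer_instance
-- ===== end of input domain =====

-- B replaces A's tracker-string-plus-template-set with a one-pass run counter and the
-- arithmetic characterisation of the four templates (alternative decomposition, same cost).

def pvVowels : List Char := ['a', 'e', 'i', 'o', 'u']

-- ===== PORT A =====
-- A's combos list (the four template strings, as char lists per the type convention)
def pvCombos : List (List Char) :=
  [['c', 'v', 'c', 'v'], ['c', 'v', 'c'], ['v', 'c', 'v'], ['v', 'c']]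

-- one loop step of A: the two if/elif chains appending to tracker
def pvStepA (tracker : List Char) (letter : Char) : List Char :=
  let t1 :=
    if letter ∉ pvVowels ∧ tracker = [] then tracker ++ ['c']
    else if letter ∉ pvVowels ∧ tracker.getLast? ≠ some 'c' then tracker ++ ['c']
    else tracker
  if letter ∈ pvVowels ∧ t1 = [] then t1 ++ ['v']
  else if letter ∈ pvVowels ∧ t1.getLast? ≠ some 'v' then t1 ++ ['v']
  else t1

def isShort (word : String) : Bool :=
  let tracker := word.toList.foldl pvStepA []
  pvCombos.contains tracker

-- ===== PORT B =====
-- B's loop step over the state (runs, prev, first_is_vowel)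
def pvStepB (st : Nat × Option Bool × Bool) (ch : Char) : Nat × Option Bool × Bool :=
  let cls := decide (ch ∈ pvVowels)
  match st with
  | (_, none, _) => (1, some cls, cls)
  | (runs, some p, f) => (if cls ≠ p then runs + 1 else runs, some cls, f)

def isShort_alt (word : String) : Bool :=
  match word.toList.foldl pvStepB (0, none, false) with
  | (runs, _, firstV) => (runs == 2 && firstV) || runs == 3 || (runs == 4 && !firstV)

-- ===== PRECONDITION & SPEC =====
def Spec_isShort (word : String) (out : Bool) : Prop := out = isShort_alt word
instance (word : String) (out : Bool) : Decidable (Spec_isShort word out) := by unfold Spec_isShort; infer_instance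

-- ===== CLAIM (what is proved, stated in full; the proofs are below) =====
def Claim_equal_isShort : Prop := ∀ (word : String), Dom_isShort word → Spec_isShort word (isShort word)

-- ===== LEMMAS AND PROOFS =====

-- the c/v class of a character, as a char and as a bool
def pvClassOf (ch : Char) : Char := if ch ∈ pvVowels then 'v' else 'c'
def pvB2c (b : Bool) : Char := if b then 'v' else 'c'

-- collapse relative to the last already-emitted symbol (A's tracker, abstractly)
def pvCollapseWith (last : Option Char) : List Char → List Char
  | [] => []
  | c :: r => if some c = last then pvCollapseWith last r else c :: pvCollapseWith (some c) r

def pvG (t : List Char) (c : Char) : List Char :=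
  if t.getLast? = some c then t else t ++ [c]

-- adjacent symbols all distinct
def pvAltOk : List Char → Bool
  | [] => true
  | [_] => true
  | a :: b :: r => a != b && pvAltOk (b :: r)

-- the alternating word of a given head and length
def pvAlt : Char → Nat → List Char
  | _, 0 => []
  | c, n + 1 => c :: pvAlt (if c = 'v' then 'c' else 'v') n

lemma pvB2c_classOf (ch : Char) : pvClassOf ch = pvB2c (decide (ch ∈ pvVowels)) := by
  by_cases h : ch ∈ pvVowels <;> simp [pvClassOf, pvB2c, h]

-- A's step equals "append the class of the letter unless it is already the last symbol"
lemma pvStepA_eq (t : List Char) (ch : Char) :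
    pvStepA t ch = pvG t (pvClassOf ch) := by
  by_cases hv : ch ∈ pvVowels <;>
    rcases t.eq_nil_or_concat with h | ⟨s, x, h⟩ <;> subst h
  · simp [pvStepA, pvG, pvClassOf, hv]
  · by_cases hx : x = 'v' <;> simp [pvStepA, pvG, pvClassOf, hv, hx]
  · simp [pvStepA, pvG, pvClassOf, hv]
  · by_cases hx : x = 'c' <;> simp [pvStepA, pvG, pvClassOf, hv, hx]

lemma pvFoldG_eq (l : List Char) : ∀ (t : List Char),
    l.foldl pvG t = t ++ pvCollapseWith t.getLast? l := by
  induction l with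
  | nil => intro t; simp [pvCollapseWith]
  | cons c r ih =>
    intro t
    rw [List.foldl_cons]
    by_cases h : t.getLast? = some c
    · have : pvG t c = t := by simp [pvG, h]
      rw [this, ih t, pvCollapseWith]
      simp [h.symm]
    · have hg : pvG t c = t ++ [c] := by simp [pvG, h]
      rw [hg, ih (t ++ [c]), pvCollapseWith]
      have hl : (t ++ [c]).getLast? = some c := by simp
      rw [hl]
      have hne : ¬ some c = t.getLast? := fun h' => h h'.symm
      simp [hne]

-- A's tracker is the duplicate-collapsed class list
lemma pvTracker_eq (l : List Char) :
    l.foldl pvStepA [] = pvCollapseWith none (l.map pvClassOf) := by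
  have hstep : pvStepA = fun t ch => pvG t (pvClassOf ch) := by
    funext t ch; exact pvStepA_eq t ch
  rw [hstep, ← List.foldl_map (f := pvClassOf) (g := pvG), pvFoldG_eq]
  simp

-- B's fold counts exactly the length of the collapsed class list
lemma pvFoldB_eq (l : List Char) : ∀ (k : Nat) (p f : Bool),
    ∃ q, l.foldl pvStepB (k, some p, f) =
      (k + (pvCollapseWith (some (pvB2c p)) (l.map pvClassOf)).length, some q, f) := by
  induction l with
  | nil => intro k p f; exact ⟨p, by simp [pvCollapseWith]⟩
  | cons c r ih =>
    intro k p f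
    rw [List.foldl_cons]
    by_cases h : decide (c ∈ pvVowels) = p
    · have hc : pvClassOf c = pvB2c p := by rw [pvB2c_classOf, h]
      have hs : pvStepB (k, some p, f) c = (k, some p, f) := by
        simp [pvStepB, h]
      rw [hs]
      obtain ⟨q, hq⟩ := ih k p f
      exact ⟨q, by rw [hq]; simp [pvCollapseWith, hc]⟩
    · have hcc : ¬ (pvB2c (decide (c ∈ pvVowels)) = pvB2c p) := by
        cases hb : decide (c ∈ pvVowels) <;> cases hp : p <;> simp_all [pvB2c]
      have hs : pvStepB (k, some p, f) c = (k + 1, some (decide (c ∈ pvVowels)), f) := by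
        simp [pvStepB, h]
      rw [hs]
      obtain ⟨q, hq⟩ := ih (k + 1) (decide (c ∈ pvVowels)) f
      refine ⟨q, ?_⟩
      rw [hq, List.map_cons, pvB2c_classOf, pvCollapseWith,
        if_neg (fun hsome => hcc (Option.some_inj.mp hsome))]
      simp only [List.length_cons]
      rw [Nat.add_comm (List.length _) 1, ← Nat.add_assoc]

-- the collapsed list never repeats adjacent symbols
lemma pvCollapse_chain (m : List Char) : ∀ (a : Char),
    pvAltOk (a :: pvCollapseWith (some a) m) = true := by
  induction m with
  | nil => intro a; rfl
  | cons c r ih =>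
    intro a
    by_cases h : some c = some a
    · rw [pvCollapseWith, if_pos h]
      have : c = a := Option.some_inj.mp h
      simpa [this] using ih a
    · rw [pvCollapseWith, if_neg h]
      have hne : a ≠ c := fun he => h (by rw [he])
      simp only [pvAltOk, Bool.and_eq_true, bne_iff_ne]
      exact ⟨hne, ih c⟩

lemma pvCollapse_subset (m : List Char) : ∀ (a : Option Char) (x : Char),
    x ∈ pvCollapseWith a m → x ∈ m := by
  induction m with
  | nil => intro a x hx; simp [pvCollapseWith] at hx
  | cons c r ih =>
    intro a x hx
    rw [pvCollapseWith] at hx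
    split at hx
    · exact List.mem_cons_of_mem _ (ih _ x hx)
    · rcases List.mem_cons.mp hx with h | h
      · exact h ▸ List.mem_cons_self
      · exact List.mem_cons_of_mem _ (ih _ x h)

-- an adjacent-distinct word over {'c','v'} is the alternating word of its head and length
lemma pvAlt_char (t : List Char) : ∀ (c0 : Char),
    (∀ x ∈ c0 :: t, x = 'c' ∨ x = 'v') → pvAltOk (c0 :: t) = true →
    c0 :: t = pvAlt c0 (t.length + 1) := by
  induction t with
  | nil => intro c0 _ _; simp [pvAlt]
  | cons b r ih =>
    intro c0 halpha hchain
    simp only [pvAltOk, Bool.and_eq_true, bne_iff_ne] at hchain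
    have hne : c0 ≠ b := hchain.1
    have hb : b = if c0 = 'v' then 'c' else 'v' := by
      rcases halpha c0 List.mem_cons_self with h0 | h0 <;>
        rcases halpha b (List.mem_cons_of_mem _ List.mem_cons_self) with h1 | h1 <;>
        simp_all
    have hrec := ih b (fun x hx => halpha x (List.mem_cons_of_mem _ hx)) hchain.2
    rw [pvAlt, ← hb]
    rw [show (b :: r).length = r.length + 1 from rfl, ← hrec]

lemma pvAlt_length (n : Nat) : ∀ (c : Char), (pvAlt c n).length = n := by
  induction n with
  | zero => intro c; simp [pvAlt]
  | succ n ih => intro c; simp [pvAlt, ih]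

-- the four templates, characterised by head class and run count
lemma pvCombos_char (n : Nat) (b : Bool) :
    pvCombos.contains (pvAlt (pvB2c b) n) =
      ((n == 2 && b) || n == 3 || (n == 4 && !b)) := by
  rcases n with _ | _ | _ | _ | _ | n
  · cases b <;> decide
  · cases b <;> decide
  · cases b <;> decide
  · cases b <;> decide
  · cases b <;> decide
  · have hlen := pvAlt_length (n + 5) (pvB2c b)
    have hnot : pvAlt (pvB2c b) (n + 5) ∉ pvCombos := by
      intro hmem
      have hle : (pvAlt (pvB2c b) (n + 5)).length ≤ 4 := by
        simp only [pvCombos, List.mem_cons, List.not_mem_nil, or_false] at hmem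
        rcases hmem with h | h | h | h <;> rw [h] <;> decide
      omega
    have h2 : (n + 5 == 2) = false := by simp
    have h3 : (n + 5 == 3) = false := by simp
    have h4 : (n + 5 == 4) = false := by simp
    rw [h2, h3, h4]
    simpa using hnot

theorem isShort_spec : Claim_equal_isShort := by
  intro word _
  unfold Spec_isShort isShort isShort_alt
  rw [pvTracker_eq]
  cases hl : word.toList with
  | nil => decide
  | cons c rest =>
    have hA : pvCollapseWith none ((c :: rest).map pvClassOf) =
        pvClassOf c :: pvCollapseWith (some (pvClassOf c)) (rest.map pvClassOf) := by
      simp [pvCollapseWith]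
    have hstep1 : pvStepB (0, none, false) c = (1, some (decide (c ∈ pvVowels)), decide (c ∈ pvVowels)) := by
      simp [pvStepB]
    obtain ⟨q, hq⟩ := pvFoldB_eq rest 1 (decide (c ∈ pvVowels)) (decide (c ∈ pvVowels))
    rw [hA, List.foldl_cons, hstep1, hq]
    set u := pvCollapseWith (some (pvB2c (decide (c ∈ pvVowels)))) (rest.map pvClassOf) with hu
    rw [pvB2c_classOf]
    have halpha : ∀ x ∈ pvB2c (decide (c ∈ pvVowels)) :: u, x = 'c' ∨ x = 'v' := by
      intro x hx
      rcases List.mem_cons.mp hx with h | h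
      · cases hb : decide (c ∈ pvVowels) <;> simp [pvB2c, hb] at h <;> simp [h]
      · have hm := pvCollapse_subset (rest.map pvClassOf) _ x (hu ▸ h)
        obtain ⟨y, _, hy⟩ := List.mem_map.mp hm
        by_cases hv : y ∈ pvVowels <;> simp [pvClassOf, hv] at hy <;> simp [← hy]
    have hchain := pvCollapse_chain (rest.map pvClassOf) (pvB2c (decide (c ∈ pvVowels)))
    rw [← hu] at hchain
    have halt := pvAlt_char u (pvB2c (decide (c ∈ pvVowels))) halpha hchain
    rw [halt, pvCombos_char (u.length + 1) (decide (c ∈ pvVowels))]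
    rw [Nat.add_comm 1 u.length]
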